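-- pv_equiv track=rewrite | github.com/BC-07/test | ocr_processor.py | _group_work_experience
-- ===== SOURCE A (Python) =====
-- from typing import Dict, List, Tuple, Optional
--
-- def _group_work_experience(work_exp_lines: List[str]) -> List[Dict]:
--     """
--     Group work experience lines into structured work experience entries
--
--     Args:
--         work_exp_lines: List of extracted work experience text lines
--
--     Returns:
--         List of structured work experience dictionaries
--     """
--     # This is a simplified grouping - in a full implementation,
--     # you would use more sophisticated parsing logic
--     work_experiences = []
--
--     current_exp = {}
--     for line in work_exp_lines:
--         line_lower = line.lower()
--
--         if 'position' in line_lower or 'designation' in line_lower: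
--             if current_exp:
--                 work_experiences.append(current_exp)
--             current_exp = {'position': line.split(':')[-1].strip()}
--         elif 'department' in line_lower or 'agency' in line_lower:
--             current_exp['department'] = line.split(':')[-1].strip()
--         elif 'salary' in line_lower:
--             current_exp['salary'] = line.split(':')[-1].strip()
--         elif 'from' in line_lower and 'to' in line_lower:
--             current_exp['period'] = line.split(':')[-1].strip()
--         elif 'govt' in line_lower or "gov't" in line_lower:
--             current_exp['govt_service'] = line.split(':')[-1].strip()
--
--     if current_exp:
--         work_experiences.append(current_exp)
--
--     return work_experiences
-- ===== SOURCE B (Python) =====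
-- from typing import Dict, List, Tuple, Optional
--
--
-- def _classify(line: str):
--     """Classify one line by the keyword priority chain; None if no keyword matches."""
--     line_lower = line.lower()
--     if 'position' in line_lower or 'designation' in line_lower:
--         key = 'position'
--     elif 'department' in line_lower or 'agency' in line_lower:
--         key = 'department'
--     elif 'salary' in line_lower:
--         key = 'salary'
--     elif 'from' in line_lower and 'to' in line_lower:
--         key = 'period'
--     elif 'govt' in line_lower or "gov't" in line_lower:
--         key = 'govt_service'
--     else:
--         return None
--     return key, line.split(':')[-1].strip()
--
--
-- def _group_work_experience(work_exp_lines: List[str]) -> List[Dict]: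
--     # Pass 1: partition the lines into groups, a new group at each position/designation marker.
--     groups = []
--     current = []
--     for line in work_exp_lines:
--         line_lower = line.lower()
--         if 'position' in line_lower or 'designation' in line_lower:
--             groups.append(current)
--             current = [line]
--         else:
--             current.append(line)
--     groups.append(current)
--
--     # Pass 2: build a dict per group (last-wins on repeated keys); keep the non-empty ones.
--     result = []
--     for group in groups:
--         entry = {}
--         for line in group:
--             kv = _classify(line)
--             if kv is not None:
--                 entry[kv[0]] = kv[1]
--         if entry:
--             result.append(entry)
--     return result
-- ===== Notes on version B (the rewrite author's own statement) =====
-- stated objective: alternative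
-- what changed: Replaces A's single pass with running (result, current-dict) state by a two-pass decomposition: first partition the lines into groups at position/designation markers, then build one dict per group with a classification helper and collect the non-empty ones.
import Mathlib
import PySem

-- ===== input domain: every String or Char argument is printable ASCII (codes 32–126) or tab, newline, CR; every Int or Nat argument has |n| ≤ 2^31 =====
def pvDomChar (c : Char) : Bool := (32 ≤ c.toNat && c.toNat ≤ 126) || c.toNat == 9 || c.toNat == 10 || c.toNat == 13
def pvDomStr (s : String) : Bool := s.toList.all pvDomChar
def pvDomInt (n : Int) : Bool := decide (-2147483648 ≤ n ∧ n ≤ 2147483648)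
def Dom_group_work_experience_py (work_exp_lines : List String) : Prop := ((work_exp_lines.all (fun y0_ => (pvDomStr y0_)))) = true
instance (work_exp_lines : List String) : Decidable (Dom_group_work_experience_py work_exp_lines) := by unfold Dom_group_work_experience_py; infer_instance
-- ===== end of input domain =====

-- B replaces A's running-state single pass by a two-pass decomposition: segment the lines into groups at position/designation markers, then build one dict per group and keep the non-empty ones (objective: alternative, same cost).


-- ===== PORT A =====
-- line.split(':')[-1].strip()  (':' is non-empty, so split? is always `some` and the list non-empty; the defaults are never used)
def pvVal (line : String) : String :=
  PySem.Str.strip (((PySem.Str.split? line ":").getD []).getLastD "")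

-- one iteration of A's for-loop: state = (work_experiences, current_exp)
def pvStepA (st : List (PySem.Dict String String) × PySem.Dict String String) (line : String) :
    List (PySem.Dict String String) × PySem.Dict String String :=
  let ll := PySem.Str.lower line
  if PySem.Str.isIn "position" ll || PySem.Str.isIn "designation" ll then
    ((if st.2.size ≠ 0 then st.1 ++ [st.2] else st.1),
     (PySem.Dict.empty).insert "position" (pvVal line))
  else if PySem.Str.isIn "department" ll || PySem.Str.isIn "agency" ll then
    (st.1, st.2.insert "department" (pvVal line))
  else if PySem.Str.isIn "salary" ll then
    (st.1, st.2.insert "salary" (pvVal line))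
  else if PySem.Str.isIn "from" ll && PySem.Str.isIn "to" ll then
    (st.1, st.2.insert "period" (pvVal line))
  else if PySem.Str.isIn "govt" ll || PySem.Str.isIn "gov't" ll then
    (st.1, st.2.insert "govt_service" (pvVal line))
  else st

-- the final 'if current_exp: append' flush
def pvFinishA (st : List (PySem.Dict String String) × PySem.Dict String String) :
    List (PySem.Dict String String) :=
  if st.2.size ≠ 0 then st.1 ++ [st.2] else st.1

def group_work_experience_py (work_exp_lines : List String) : List (List (String × String)) :=
  (pvFinishA (work_exp_lines.foldl pvStepA ([], PySem.Dict.empty))).map (fun d => d.items)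

-- ===== PORT B =====
-- _classify: the keyword priority chain, as (key, value) or none
def pvClassify (line : String) : Option (String × String) :=
  let ll := PySem.Str.lower line
  if PySem.Str.isIn "position" ll || PySem.Str.isIn "designation" ll then
    some ("position", pvVal line)
  else if PySem.Str.isIn "department" ll || PySem.Str.isIn "agency" ll then
    some ("department", pvVal line)
  else if PySem.Str.isIn "salary" ll then
    some ("salary", pvVal line)
  else if PySem.Str.isIn "from" ll && PySem.Str.isIn "to" ll then
    some ("period", pvVal line)
  else if PySem.Str.isIn "govt" ll || PySem.Str.isIn "gov't" ll then
    some ("govt_service", pvVal line)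
  else none

-- pass 1: partition into groups, a new group at each position/designation marker
def pvGroups (current : List String) : List String → List (List String)
  | [] => [current]
  | line :: rest =>
    if PySem.Str.isIn "position" (PySem.Str.lower line)
        || PySem.Str.isIn "designation" (PySem.Str.lower line) then
      current :: pvGroups [line] rest
    else
      pvGroups (current ++ [line]) rest

-- pass 2 inner loop: build a dict from one group
def pvBuild (group : List String) : PySem.Dict String String :=
  group.foldl (fun d line =>
    match pvClassify line with
    | some kv => d.insert kv.1 kv.2
    | none => d) PySem.Dict.empty

-- pass 2 outer loop step: keep the non-empty entries
def pvStepB (res : List (PySem.Dict String String)) (g : List String) :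
    List (PySem.Dict String String) :=
  if (pvBuild g).size ≠ 0 then res ++ [pvBuild g] else res

def group_work_experience_py_alt (work_exp_lines : List String) : List (List (String × String)) :=
  ((pvGroups [] work_exp_lines).foldl pvStepB []).map (fun d => d.items)

-- ===== PRECONDITION & SPEC =====
def Spec_group_work_experience_py (work_exp_lines : List String) (out : List (List (String × String))) : Prop := out = group_work_experience_py_alt work_exp_lines
instance (work_exp_lines : List String) (out : List (List (String × String))) : Decidable (Spec_group_work_experience_py work_exp_lines out) := by unfold Spec_group_work_experience_py; infer_instance

-- ===== CLAIM (what is proved, stated in full; the proofs are below) =====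
def Claim_equal_group_work_experience_py : Prop := ∀ (work_exp_lines : List String), Dom_group_work_experience_py work_exp_lines → Spec_group_work_experience_py work_exp_lines (group_work_experience_py work_exp_lines)

-- ===== LEMMAS AND PROOFS =====

-- B's pass-2 outer loop from an arbitrary accumulator
theorem pvStepB_start (gs : List (List String)) (res : List (PySem.Dict String String)) :
    gs.foldl pvStepB res = res ++ gs.foldl pvStepB [] := by
  induction gs generalizing res with
  | nil => simp
  | cons g gs ih =>
    simp only [List.foldl_cons]
    rw [ih (pvStepB res g), ih (pvStepB [] g)]
    simp [pvStepB]
    split_ifs <;> simp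

-- A's step on a non-marker line is B's classification
theorem pvStepA_nonmarker (st : List (PySem.Dict String String) × PySem.Dict String String)
    (line : String)
    (h : (PySem.Str.isIn "position" (PySem.Str.lower line)
        || PySem.Str.isIn "designation" (PySem.Str.lower line)) = false) :
    pvStepA st line = (st.1, match pvClassify line with
      | some kv => st.2.insert kv.1 kv.2
      | none => st.2) := by
  simp only [pvStepA, pvClassify, h, Bool.false_eq_true, if_false]
  split_ifs <;> rfl

theorem pvBuild_append (g : List String) (line : String) :
    pvBuild (g ++ [line]) = (match pvClassify line with
      | some kv => (pvBuild g).insert kv.1 kv.2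
      | none => pvBuild g) := by
  simp only [pvBuild, List.foldl_append, List.foldl_cons, List.foldl_nil]

-- main invariant: A's loop started in state (wes, pvBuild acc) computes wes ++ B's collection of the remaining groups
theorem pvMain (lines : List String) : ∀ (acc : List String) (wes : List (PySem.Dict String String)),
    pvFinishA (lines.foldl pvStepA (wes, pvBuild acc))
      = wes ++ (pvGroups acc lines).foldl pvStepB [] := by
  induction lines with
  | nil =>
    intro acc wes
    simp only [List.foldl_nil, pvFinishA, pvGroups, List.foldl_cons, pvStepB]
    split_ifs <;> simp
  | cons line rest ih =>
    intro acc wes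
    by_cases h : (PySem.Str.isIn "position" (PySem.Str.lower line)
        || PySem.Str.isIn "designation" (PySem.Str.lower line)) = true
    · have hstep : pvStepA (wes, pvBuild acc) line
          = (pvStepB wes acc, pvBuild [line]) := by
        simp only [pvStepA, pvStepB, h, if_true, pvBuild, List.foldl_cons, List.foldl_nil,
          pvClassify]
      simp only [List.foldl_cons, hstep, ih [line], pvGroups, h, if_true, List.foldl_cons]
      rw [pvStepB_start (pvGroups [line] rest) (pvStepB [] acc)]
      simp only [pvStepB]
      split_ifs <;> simp
    · have h' := eq_false_of_ne_true h
      have hstep := pvStepA_nonmarker (wes, pvBuild acc) line h'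
      rw [← pvBuild_append acc line] at hstep
      simp only [List.foldl_cons, hstep, ih (acc ++ [line]), pvGroups, h', Bool.false_eq_true,
        if_false]

-- ===== VERDICT (by name: the statement is the Claim_ definition above) =====
theorem group_work_experience_py_spec : Claim_equal_group_work_experience_py := by
  intro lines _
  show _ = _
  unfold group_work_experience_py group_work_experience_py_alt
  have h := pvMain lines [] []
  rw [List.nil_append] at h
  exact congrArg (List.map fun d => d.items) h
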